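-- pv_equiv track=rewrite | github.com/tfnribeiro/WebQAmGaze | scripts/utils.py | sentence_to_word_pos_dictionary
-- ===== SOURCE A (Python) =====
-- def sentence_to_word_list(sentence):
--     return [word for word in sentence.split(" ")]
--
-- def sentence_to_word_pos_dictionary(sentence):
--     word_pos_dict = dict()
--     start_str = 0
--     for word_i, word in enumerate(sentence_to_word_list(sentence)):
--         word_end = start_str + len(word)
--         word_pos_dict[start_str] = word_i
--         start_str = word_end+1
--     return word_pos_dict
-- ===== SOURCE B (Python) =====
-- def sentence_to_word_pos_dictionary(sentence):
--     starts = [0] + [i + 1 for i, c in enumerate(sentence) if c == " "]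
--     return {start: k for k, start in enumerate(starts)}
-- ===== Notes on version B (the rewrite author's own statement) =====
-- stated objective: alternative
-- what changed: B never splits the sentence or sums word lengths: it scans the characters once for space positions (a word starts at 0 and right after each space) and zips those start offsets with their indices, replacing A's split + running prefix-sum loop over words.
import Mathlib
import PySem

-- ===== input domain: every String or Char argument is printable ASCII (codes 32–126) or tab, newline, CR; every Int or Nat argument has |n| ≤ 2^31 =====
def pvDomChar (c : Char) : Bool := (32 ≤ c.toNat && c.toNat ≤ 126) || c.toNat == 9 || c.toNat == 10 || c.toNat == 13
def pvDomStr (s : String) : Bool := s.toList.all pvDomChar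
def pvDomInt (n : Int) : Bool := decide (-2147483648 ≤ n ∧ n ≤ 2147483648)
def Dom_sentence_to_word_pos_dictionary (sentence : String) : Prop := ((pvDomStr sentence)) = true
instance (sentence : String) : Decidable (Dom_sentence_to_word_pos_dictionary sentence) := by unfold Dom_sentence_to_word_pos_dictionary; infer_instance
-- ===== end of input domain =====

-- B does not split the sentence or sum word lengths: it scans the characters for spaces
-- (a word starts at offset 0 and right after each space) and zips those starts with indices.

-- ===== PORT A =====
-- helper 'sentence_to_word_list': [word for word in sentence.split(" ")]
def sentence_to_word_list (sentence : String) : List (List Char) :=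
  (PySem.Chars.splitOn sentence.toList [' ']).map (fun word => word)

def sentence_to_word_pos_dictionary (sentence : String) : List (Int × Int) :=
  (((PySem.List.enumerate (sentence_to_word_list sentence)).foldl
      (fun (st : PySem.Dict Int Int × Int) p =>
        let word_i := p.1
        let word := p.2
        let word_end := st.2 + (word.length : Int)
        (st.1.insert st.2 word_i, word_end + 1))
      (PySem.Dict.empty, 0)).1).items

-- ===== PORT B =====
def sentence_to_word_pos_dictionary_alt (sentence : String) : List (Int × Int) :=
  let starts : List Int :=
    0 :: ((PySem.List.enumerate sentence.toList).filter (fun p => p.2 == ' ')).map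
          (fun p => p.1 + 1)
  (PySem.List.enumerate starts).map (fun p => (p.2, p.1))

-- ===== PRECONDITION & SPEC =====
def Spec_sentence_to_word_pos_dictionary (sentence : String) (out : List (Int × Int)) : Prop := out = sentence_to_word_pos_dictionary_alt sentence
instance (sentence : String) (out : List (Int × Int)) : Decidable (Spec_sentence_to_word_pos_dictionary sentence out) := by unfold Spec_sentence_to_word_pos_dictionary; infer_instance

-- ===== CLAIM =====
def Claim_equal_sentence_to_word_pos_dictionary : Prop := ∀ (sentence : String), Dom_sentence_to_word_pos_dictionary sentence → Spec_sentence_to_word_pos_dictionary sentence (sentence_to_word_pos_dictionary sentence)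

-- ===== LEMMAS AND PROOFS =====

-- the pairs (start, index) that A produces for a word list beginning at start s, index k
def pvPairs : List (List Char) → Int → Int → List (Int × Int)
  | [], _, _ => []
  | w :: ws, s, k => (s, k) :: pvPairs ws (s + (w.length : Int) + 1) (k + 1)

-- the pairs contributed by the spaces of the remaining characters, at position s, word index k
def pvScan : List Char → Int → Int → List (Int × Int)
  | [], _, _ => []
  | c :: t, s, k =>
      if c = ' ' then (s + 1, k + 1) :: pvScan t (s + 1) (k + 1) else pvScan t (s + 1) k

-- splitOn.go is linear in its accumulator
lemma pvGo_acc (sep : List Char) :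
    ∀ fuel l cur acc, PySem.Chars.splitOn.go sep fuel l cur acc
      = acc.reverse ++ PySem.Chars.splitOn.go sep fuel l cur [] := by
  intro fuel
  induction fuel with
  | zero => intro l cur acc; simp [PySem.Chars.splitOn.go]
  | succ n ih =>
    intro l
    cases l with
    | nil => intro cur acc; simp [PySem.Chars.splitOn.go]
    | cons c rest =>
      intro cur acc
      rw [PySem.Chars.splitOn.go]
      conv_rhs => rw [PySem.Chars.splitOn.go]
      split
      · rw [ih _ _ (cur.reverse :: acc), ih _ _ [cur.reverse]]; simp
      · exact ih _ _ _

-- splitOn.go prepends cur.reverse to the head of the zero-accumulator run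
lemma pvGo_cur (sep : List Char) :
    ∀ fuel l cur, PySem.Chars.splitOn.go sep fuel l cur []
      = (PySem.Chars.splitOn.go sep fuel l [] []).modifyHead (cur.reverse ++ ·) := by
  intro fuel
  induction fuel with
  | zero => intro l cur; simp [PySem.Chars.splitOn.go]
  | succ n ih =>
    intro l
    cases l with
    | nil => intro cur; simp [PySem.Chars.splitOn.go]
    | cons c rest =>
      intro cur
      rw [PySem.Chars.splitOn.go]
      conv_rhs => rw [PySem.Chars.splitOn.go]
      split
      · rw [pvGo_acc sep _ _ _ [cur.reverse], pvGo_acc sep _ _ _ [List.reverse []]]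
        simp
      · rw [ih _ (c :: cur), ih _ [c], List.modifyHead_modifyHead]
        simp only [List.reverse_cons, Function.comp_def, List.append_assoc, List.singleton_append, List.reverse_nil, List.nil_append]

-- splitOn recurrence at a space
lemma pvSplit_space (t : List Char) :
    PySem.Chars.splitOn (' ' :: t) [' '] = [] :: PySem.Chars.splitOn t [' '] := by
  show PySem.Chars.splitOn.go [' '] (t.length + 1 + 1) (' ' :: t) [] [] = _
  rw [PySem.Chars.splitOn.go]
  simp only [List.isPrefixOf, BEq.rfl, Bool.true_and, if_true]
  rw [pvGo_acc [' '] _ _ _ [List.reverse []]]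
  rfl

-- splitOn recurrence at a non-space
lemma pvSplit_nonspace (c : Char) (t : List Char) (h : c ≠ ' ') :
    PySem.Chars.splitOn (c :: t) [' ']
      = (PySem.Chars.splitOn t [' ']).modifyHead (c :: ·) := by
  show PySem.Chars.splitOn.go [' '] (t.length + 1 + 1) (c :: t) [] [] = _
  rw [PySem.Chars.splitOn.go]
  have : [' '].isPrefixOf (c :: t) = false := by
    simp [List.isPrefixOf]
    exact fun hc => absurd hc.symm h
  rw [this]
  simp only [Bool.false_eq_true, if_false]
  rw [pvGo_cur [' '] _ _ [c]]
  rfl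

-- splitOn never returns the empty list
lemma pvGo_ne_nil (sep : List Char) :
    ∀ fuel l cur acc, PySem.Chars.splitOn.go sep fuel l cur acc ≠ [] := by
  intro fuel
  induction fuel with
  | zero => intro l cur acc; simp [PySem.Chars.splitOn.go]
  | succ n ih =>
    intro l
    cases l with
    | nil => intro cur acc; simp [PySem.Chars.splitOn.go]
    | cons c rest =>
      intro cur acc
      rw [PySem.Chars.splitOn.go]
      split
      · exact ih _ _ _
      · exact ih _ _ _

lemma pvSplitOn_ne_nil (s : List Char) : PySem.Chars.splitOn s [' '] ≠ [] :=
  pvGo_ne_nil _ _ s [] []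

-- the bridge: A's word pairs over split(' ') are exactly (s,k) followed by the space scan
lemma pvPairs_split (l : List Char) :
    ∀ (s k : Int), pvPairs (PySem.Chars.splitOn l [' ']) s k = (s, k) :: pvScan l s k := by
  induction l with
  | nil => intro s k; rfl
  | cons c t ih =>
    intro s k
    by_cases hc : c = ' '
    · subst hc
      rw [pvSplit_space, pvPairs, pvScan, if_pos rfl]
      simp only [List.length_nil, Nat.cast_zero, add_zero]
      rw [ih (s + 1) (k + 1)]
    · obtain ⟨w, ws, hws⟩ := List.exists_cons_of_ne_nil (pvSplitOn_ne_nil t)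
      rw [pvSplit_nonspace c t hc, hws, List.modifyHead_cons, pvPairs, pvScan, if_neg hc]
      have hih := ih (s + 1) k
      rw [hws, pvPairs] at hih
      have htail := ((List.cons.injEq _ _ _ _).mp hih).2
      have hcast : s + (((c :: w).length : Nat) : Int) + 1 = s + 1 + (w.length : Int) + 1 := by
        push_cast [List.length_cons]; ring
      rw [hcast, htail]

-- A's loop produces exactly pvPairs
lemma pvA_loop (ws : List (List Char)) :
    ∀ (s k : Int) (d : PySem.Dict Int Int), (∀ x ∈ d.items, x.1 < s) →
    (((PySem.List.enumerate ws k).foldl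
        (fun (st : PySem.Dict Int Int × Int) p =>
          (st.1.insert st.2 p.1, st.2 + (p.2.length : Int) + 1))
        (d, s)).1).items = d.items ++ pvPairs ws s k := by
  induction ws with
  | nil => intro s k d _; simp [PySem.List.enumerate, pvPairs]
  | cons w ws ih =>
    intro s k d hlt
    rw [PySem.List.enumerate_cons, List.foldl_cons]
    have hnc : d.contains s = false := by
      rw [PySem.Dict.contains_eq_decide_mem_keys]
      simp only [decide_eq_false_iff_not, PySem.Dict.keys, List.mem_map]
      rintro ⟨x, hx, rfl⟩
      exact lt_irrefl _ (hlt x hx)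
    have hins : (d.insert s k).items = d.items ++ [(s, k)] :=
      PySem.Dict.items_insert_of_not_contains _ _ hnc
    have hlt' : ∀ x ∈ (d.insert s k).items, x.1 < s + (w.length : Int) + 1 := by
      intro x hx
      rw [hins, List.mem_append] at hx
      rcases hx with hx | hx
      · have := hlt x hx; omega
      · simp at hx; subst hx; simp
    rw [ih (s + (w.length : Int) + 1) (k + 1) (d.insert s k) hlt', hins, pvPairs]
    simp

-- B's filtered space positions, zipped with indices, give pvScan
lemma pvB_scan (l : List Char) :
    ∀ (s k : Int),
    (PySem.List.enumerate
        (((PySem.List.enumerate l s).filter (fun p => p.2 == ' ')).map (fun p => p.1 + 1))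
        (k + 1)).map (fun p => (p.2, p.1))
      = pvScan l s k := by
  induction l with
  | nil => intro s k; rfl
  | cons c t ih =>
    intro s k
    rw [PySem.List.enumerate_cons, List.filter_cons]
    by_cases hc : c = ' '
    · simp only [hc, BEq.rfl, if_true, List.map_cons, PySem.List.enumerate_cons, pvScan]
      exact congrArg _ (ih (s + 1) (k + 1))
    · have : ((s, c).2 == ' ') = false := by simpa using hc
      rw [this]
      simp only [Bool.false_eq_true, if_false, pvScan, if_neg hc]
      exact ih (s + 1) k

-- ===== VERDICT =====
theorem sentence_to_word_pos_dictionary_spec : Claim_equal_sentence_to_word_pos_dictionary := by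
  intro sentence _
  unfold Spec_sentence_to_word_pos_dictionary
  simp only [sentence_to_word_pos_dictionary, sentence_to_word_pos_dictionary_alt,
    sentence_to_word_list, List.map_id']
  rw [pvA_loop _ 0 0 PySem.Dict.empty (by intro x hx; simp [PySem.Dict.empty] at hx)]
  rw [PySem.List.enumerate_cons, List.map_cons]
  rw [show (0 : Int) + 1 = 0 + 1 from rfl]
  rw [pvB_scan sentence.toList 0 0, pvPairs_split sentence.toList 0 0]
  simp [PySem.Dict.empty]
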